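-- pv_equiv track=rewrite | github.com/clarkzjw/tma25-oneweb | Fig-7/plot.py | split_json_by_braces
-- ===== SOURCE A (Python) =====
-- def split_json_by_braces(text):
--     lines = text.splitlines()
--     jsons = []
--     current = []
--
--     for line in lines:
--         if line == "{":
--             current = [line]
--         elif line == "}":
--             current.append(line)
--             jsons.append("\n".join(current))
--             current = []
--         else:
--             current.append(line)
--
--     return jsons
-- ===== SOURCE B (Python) =====
-- def split_json_by_braces(text):
--     lines = text.splitlines()
--     jsons = []
--     start = 0
--     for i, line in enumerate(lines):
--         if line == "{":
--             start = i
--         elif line == "}":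
--             jsons.append("\n".join(lines[start:i + 1]))
--             start = i + 1
--     return jsons
-- ===== Notes on version B (the rewrite author's own statement) =====
-- stated objective: simpler
-- what changed: B keeps only an integer block-start index and slices the line list at each closing brace, instead of maintaining and mutating an incremental buffer list with an else-branch append.
import Mathlib
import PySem

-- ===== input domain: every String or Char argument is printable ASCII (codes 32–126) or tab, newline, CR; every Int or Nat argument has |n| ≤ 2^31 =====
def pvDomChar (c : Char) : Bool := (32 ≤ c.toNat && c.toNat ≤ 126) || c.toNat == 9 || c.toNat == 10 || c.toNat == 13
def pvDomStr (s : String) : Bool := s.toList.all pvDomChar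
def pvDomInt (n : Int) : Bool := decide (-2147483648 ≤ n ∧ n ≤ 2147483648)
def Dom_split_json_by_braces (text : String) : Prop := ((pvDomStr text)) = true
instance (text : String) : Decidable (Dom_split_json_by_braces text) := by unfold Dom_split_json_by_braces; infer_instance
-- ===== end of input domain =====

-- B replaces A's incrementally grown buffer list by a block-start index plus a slice (simpler state, no else-branch append); return values proved equal.

-- ===== PORT A =====
-- loop body of A: state = (jsons, current)
def pvStepA (st : List String × List String) (line : String) : List String × List String :=
  if line = "{" then (st.1, [line])
  else if line = "}" then (st.1 ++ [PySem.Str.join "\n" (st.2 ++ [line])], [])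
  else (st.1, st.2 ++ [line])

def split_json_by_braces (text : String) : List String :=
  let lines := PySem.Str.splitlines text
  ((lines.foldl pvStepA ([], [])).1)

-- ===== PORT B =====
-- loop body of B: state = (jsons, start)
def pvStepB (lines : List String) (st : List String × Int) (p : Int × String) : List String × Int :=
  if p.2 = "{" then (st.1, p.1)
  else if p.2 = "}" then
    (st.1 ++ [PySem.Str.join "\n" (PySem.List.slice lines (some st.2) (some (p.1 + 1)))], p.1 + 1)
  else st

def split_json_by_braces_alt (text : String) : List String :=
  let lines := PySem.Str.splitlines text
  ((PySem.List.enumerate lines 0).foldl (pvStepB lines) ([], 0)).1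

-- ===== PRECONDITION & SPEC =====
def Spec_split_json_by_braces (text : String) (out : List String) : Prop := out = split_json_by_braces_alt text
instance (text : String) (out : List String) : Decidable (Spec_split_json_by_braces text out) := by unfold Spec_split_json_by_braces; infer_instance

-- ===== CLAIM (what is proved, stated in full; the proofs are below) =====
def Claim_equal_split_json_by_braces : Prop := ∀ (text : String), Dom_split_json_by_braces text → Spec_split_json_by_braces text (split_json_by_braces text)

-- ===== LEMMAS AND PROOFS =====

-- Invariant: after processing the first i lines, A's buffer `current` is exactly lines[start:i].
theorem pv_loop (lines : List String) :
    ∀ (rest : List String) (i start : Nat) (js : List String),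
      start ≤ i → lines.drop i = rest →
      (rest.foldl pvStepA (js, (lines.drop start).take (i - start))).1 =
      ((PySem.List.enumerate rest (i : Int)).foldl (pvStepB lines) (js, (start : Int))).1 := by
  intro rest
  induction rest with
  | nil => intro i start js _ _; simp [PySem.List.enumerate_nil]
  | cons l rest ih =>
    intro i start js hle hdrop
    have hdrop' : lines.drop (i + 1) = rest := by
      have := congrArg List.tail hdrop
      simpa [List.tail_drop] using this
    have hl : (lines.drop start)[i - start]? = some l := by
      have h0 : (lines.drop i)[0]? = some l := by rw [hdrop]; rfl
      rw [List.getElem?_drop] at h0 ⊢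
      have : start + (i - start) = i + 0 := by omega
      rw [this]; exact h0
    have htake : (lines.drop start).take (i + 1 - start) =
        (lines.drop start).take (i - start) ++ [l] := by
      have : i + 1 - start = (i - start) + 1 := by omega
      rw [this, List.take_add_one, hl]; rfl
    rw [PySem.List.enumerate_cons]
    simp only [List.foldl_cons, pvStepA, pvStepB]
    have hcast : ((i : Int) + 1) = (((i + 1 : Nat)) : Int) := by push_cast; ring
    by_cases h1 : l = "{"
    · subst h1
      simp only [reduceIte]
      have := ih (i + 1) i js (by omega) hdrop'
      have htake1 : (lines.drop i).take (i + 1 - i) = ["{"] := by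
        rw [hdrop]; simp
      rw [htake1] at this
      rw [hcast]
      exact this
    · by_cases h2 : l = "}"
      · subst h2
        simp only [if_neg h1, reduceIte]
        have hslice : PySem.List.slice lines (some (start : Int)) (some ((i : Int) + 1)) =
            (lines.drop start).take (i + 1 - start) := by
          rw [hcast, PySem.List.slice_natCast]
        have := ih (i + 1) (i + 1)
          (js ++ [PySem.Str.join "\n" ((lines.drop start).take (i - start) ++ ["}"])])
          (le_refl _) hdrop'
        simp only [Nat.sub_self, List.take_zero] at this
        rw [hslice, htake, hcast]
        exact this
      · simp only [if_neg h1, if_neg h2]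
        have := ih (i + 1) start js (by omega) hdrop'
        rw [htake] at this
        rw [hcast]
        exact this

-- ===== VERDICT (by name: the statement is the Claim_ definition above) =====
theorem split_json_by_braces_spec : Claim_equal_split_json_by_braces := by
  intro text _
  unfold Spec_split_json_by_braces split_json_by_braces split_json_by_braces_alt
  have := pv_loop (PySem.Str.splitlines text) (PySem.Str.splitlines text) 0 0 [] (le_refl _) (by simp)
  simpa using this
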